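-- pv_equiv track=rewrite | github.com/Manvadariya/2526_SDP8_PullRequest_Intelligence_System | backend/src/webhooks/core/project_context.py | _prioritize_files
-- ===== SOURCE A (Python) =====
-- from typing import List, Set, Optional, Tuple
--
-- def _prioritize_files(file_paths: List[str]) -> List[str]:
--     def score(path_str: str) -> int:
--         p = path_str.lower()
--         if "readme" in p:
--             return 0
--         if "project.md" in p or "architecture" in p:
--             return 1
--         if any(x in p for x in ["package.json", "requirements.txt", "dockerfile", "cargo.toml", "pyproject.toml"]):
--             return 2
--         if "src/" in p or "/app" in p or p.startswith("src"):
--             return 3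
--         return 4
--
--     return sorted(file_paths, key=score)
-- ===== SOURCE B (Python) =====
-- from typing import List
--
-- def _prioritize_files(file_paths: List[str]) -> List[str]:
--     # One-pass bucket sort over the 5 fixed priority scores, preserving input order.
--     buckets = ([], [], [], [], [])
--     for path in file_paths:
--         p = path.lower()
--         if "readme" in p:
--             k = 0
--         elif "project.md" in p or "architecture" in p:
--             k = 1
--         elif ("package.json" in p or "requirements.txt" in p or "dockerfile" in p
--               or "cargo.toml" in p or "pyproject.toml" in p):
--             k = 2
--         elif "src/" in p or "/app" in p or p.startswith("src"):
--             k = 3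
--         else:
--             k = 4
--         buckets[k].append(path)
--     return [p for b in buckets for p in b]
-- ===== Notes on version B (the rewrite author's own statement) =====
-- stated objective: faster
-- what changed: Replaces the key-based stable sort with a single-pass bucket sort over the 5 fixed score values, concatenating the buckets in score order.
import Mathlib
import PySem

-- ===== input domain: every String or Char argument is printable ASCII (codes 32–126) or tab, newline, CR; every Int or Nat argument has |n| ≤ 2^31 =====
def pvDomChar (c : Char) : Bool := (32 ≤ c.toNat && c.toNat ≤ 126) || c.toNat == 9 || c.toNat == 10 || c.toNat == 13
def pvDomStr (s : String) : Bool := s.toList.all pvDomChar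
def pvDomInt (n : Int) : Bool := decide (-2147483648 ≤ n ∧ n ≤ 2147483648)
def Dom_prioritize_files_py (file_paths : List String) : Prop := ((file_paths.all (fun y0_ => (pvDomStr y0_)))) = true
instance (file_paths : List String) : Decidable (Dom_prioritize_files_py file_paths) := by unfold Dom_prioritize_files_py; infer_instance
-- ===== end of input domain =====

-- B replaces the key-based stable sort with a one-pass bucket sort over the 5 fixed scores (objective: faster).

-- ===== PORT A =====
-- the inner 'score' helper of A
def pvScore (path_str : String) : Int :=
  let p := PySem.Str.lower path_str
  if PySem.Str.isIn "readme" p then 0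
  else if PySem.Str.isIn "project.md" p || PySem.Str.isIn "architecture" p then 1
  else if ["package.json", "requirements.txt", "dockerfile", "cargo.toml", "pyproject.toml"].any
      (fun x => PySem.Str.isIn x p) then 2
  else if PySem.Str.isIn "src/" p || (PySem.Str.isIn "/app" p || PySem.Str.startswith p "src") then 3
  else 4

def prioritize_files_py (file_paths : List String) : List String :=
  PySem.List.sorted file_paths pvScore

-- ===== PORT B =====
-- one step of B's loop: classify 'path' by the elif chain and append it to its bucket
def pvAltStep (s : List String × List String × List String × List String × List String)
    (path : String) : List String × List String × List String × List String × List String :=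
  let p := PySem.Str.lower path
  if PySem.Str.isIn "readme" p then
    (s.1 ++ [path], s.2.1, s.2.2.1, s.2.2.2.1, s.2.2.2.2)
  else if PySem.Str.isIn "project.md" p || PySem.Str.isIn "architecture" p then
    (s.1, s.2.1 ++ [path], s.2.2.1, s.2.2.2.1, s.2.2.2.2)
  else if PySem.Str.isIn "package.json" p || (PySem.Str.isIn "requirements.txt" p ||
      (PySem.Str.isIn "dockerfile" p || (PySem.Str.isIn "cargo.toml" p ||
      PySem.Str.isIn "pyproject.toml" p))) then
    (s.1, s.2.1, s.2.2.1 ++ [path], s.2.2.2.1, s.2.2.2.2)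
  else if PySem.Str.isIn "src/" p || (PySem.Str.isIn "/app" p || PySem.Str.startswith p "src") then
    (s.1, s.2.1, s.2.2.1, s.2.2.2.1 ++ [path], s.2.2.2.2)
  else
    (s.1, s.2.1, s.2.2.1, s.2.2.2.1, s.2.2.2.2 ++ [path])

def prioritize_files_py_alt (file_paths : List String) : List String :=
  let s := file_paths.foldl pvAltStep ([], [], [], [], [])
  s.1 ++ (s.2.1 ++ (s.2.2.1 ++ (s.2.2.2.1 ++ s.2.2.2.2)))

-- ===== PRECONDITION & SPEC =====
def Spec_prioritize_files_py (file_paths : List String) (out : List String) : Prop := out = prioritize_files_py_alt file_paths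
instance (file_paths : List String) (out : List String) : Decidable (Spec_prioritize_files_py file_paths out) := by unfold Spec_prioritize_files_py; infer_instance

-- ===== CLAIM (what is proved, stated in full; the proofs are below) =====
def Claim_equal_prioritize_files_py : Prop := ∀ (file_paths : List String), Dom_prioritize_files_py file_paths → Spec_prioritize_files_py file_paths (prioritize_files_py file_paths)

-- ===== LEMMAS AND PROOFS =====

-- inserting x into a concatenation where x goes after all of l and before all of t
lemma pvInsertBy_bucket {α : Type} (before : α → α → Bool) (x : α) (l t : List α)
    (hl : ∀ y ∈ l, before x y = false) (ht : ∀ y ∈ t, before x y = true) :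
    PySem.List.insertBy before x (l ++ t) = l ++ x :: t := by
  induction l with
  | nil =>
    cases t with
    | nil => simp [PySem.List.insertBy]
    | cons y ys => simp [PySem.List.insertBy, ht y (List.mem_cons_self)]
  | cons a l ih =>
    simp [PySem.List.insertBy, hl a (List.mem_cons_self),
      ih (fun y hy => hl y (List.mem_cons_of_mem a hy))]

-- each step of B appends x to the bucket numbered by A's score
lemma pvStep_cases (b0 b1 b2 b3 b4 : List String) (x : String) :
    (pvScore x = 0 ∧ pvAltStep (b0, b1, b2, b3, b4) x = (b0 ++ [x], b1, b2, b3, b4)) ∨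
    (pvScore x = 1 ∧ pvAltStep (b0, b1, b2, b3, b4) x = (b0, b1 ++ [x], b2, b3, b4)) ∨
    (pvScore x = 2 ∧ pvAltStep (b0, b1, b2, b3, b4) x = (b0, b1, b2 ++ [x], b3, b4)) ∨
    (pvScore x = 3 ∧ pvAltStep (b0, b1, b2, b3, b4) x = (b0, b1, b2, b3 ++ [x], b4)) ∨
    (pvScore x = 4 ∧ pvAltStep (b0, b1, b2, b3, b4) x = (b0, b1, b2, b3, b4 ++ [x])) := by
  simp only [pvScore, pvAltStep, List.any_cons, List.any_nil, Bool.or_false]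
  split_ifs <;> simp

-- loop invariant: A's insertion fold over the flattened buckets equals B's bucket fold, flattened
lemma pvLoop (xs : List String) : ∀ b0 b1 b2 b3 b4 : List String,
    (∀ y ∈ b0, pvScore y = 0) → (∀ y ∈ b1, pvScore y = 1) → (∀ y ∈ b2, pvScore y = 2) →
    (∀ y ∈ b3, pvScore y = 3) → (∀ y ∈ b4, pvScore y = 4) →
    xs.foldl (fun acc x => PySem.List.insertBy (fun a b => decide (pvScore a < pvScore b)) x acc)
        (b0 ++ (b1 ++ (b2 ++ (b3 ++ b4))))
      = (fun s : List String × List String × List String × List String × List String =>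
          s.1 ++ (s.2.1 ++ (s.2.2.1 ++ (s.2.2.2.1 ++ s.2.2.2.2)))) (xs.foldl pvAltStep (b0, b1, b2, b3, b4)) := by
  induction xs with
  | nil => intro b0 b1 b2 b3 b4 _ _ _ _ _; rfl
  | cons x xs ih =>
    intro b0 b1 b2 b3 b4 h0 h1 h2 h3 h4
    simp only [List.foldl_cons]
    rcases pvStep_cases b0 b1 b2 b3 b4 x with ⟨hx, hs⟩ | ⟨hx, hs⟩ | ⟨hx, hs⟩ | ⟨hx, hs⟩ | ⟨hx, hs⟩ <;> rw [hs]
    · rw [pvInsertBy_bucket _ x b0 (b1 ++ (b2 ++ (b3 ++ b4)))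
        (fun y hy => by simp [hx, h0 y hy])
        (fun y hy => by
          simp only [List.mem_append] at hy
          rcases hy with hy | hy | hy | hy
          · simp [hx, h1 y hy]
          · simp [hx, h2 y hy]
          · simp [hx, h3 y hy]
          · simp [hx, h4 y hy])]
      rw [show b0 ++ x :: (b1 ++ (b2 ++ (b3 ++ b4))) = (b0 ++ [x]) ++ (b1 ++ (b2 ++ (b3 ++ b4))) by simp]
      exact ih (b0 ++ [x]) b1 b2 b3 b4
        (fun y hy => by
        rcases List.mem_append.1 hy with hy | hy
        · exact h0 y hy
        · rw [List.mem_singleton] at hy; rw [hy]; exact hx)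
        h1 h2 h3 h4
    · rw [show b0 ++ (b1 ++ (b2 ++ (b3 ++ b4))) = (b0 ++ b1) ++ (b2 ++ (b3 ++ b4)) by simp]
      rw [pvInsertBy_bucket _ x (b0 ++ b1) (b2 ++ (b3 ++ b4))
        (fun y hy => by
          rcases List.mem_append.1 hy with hy | hy
          · simp [hx, h0 y hy]
          · simp [hx, h1 y hy])
        (fun y hy => by
          simp only [List.mem_append] at hy
          rcases hy with hy | hy | hy
          · simp [hx, h2 y hy]
          · simp [hx, h3 y hy]
          · simp [hx, h4 y hy])]
      rw [show (b0 ++ b1) ++ x :: (b2 ++ (b3 ++ b4)) = b0 ++ ((b1 ++ [x]) ++ (b2 ++ (b3 ++ b4))) by simp]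
      exact ih b0 (b1 ++ [x]) b2 b3 b4 h0
        (fun y hy => by
        rcases List.mem_append.1 hy with hy | hy
        · exact h1 y hy
        · rw [List.mem_singleton] at hy; rw [hy]; exact hx)
        h2 h3 h4
    · rw [show b0 ++ (b1 ++ (b2 ++ (b3 ++ b4))) = (b0 ++ (b1 ++ b2)) ++ (b3 ++ b4) by simp]
      rw [pvInsertBy_bucket _ x (b0 ++ (b1 ++ b2)) (b3 ++ b4)
        (fun y hy => by
          simp only [List.mem_append] at hy
          rcases hy with hy | hy | hy
          · simp [hx, h0 y hy]
          · simp [hx, h1 y hy]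
          · simp [hx, h2 y hy])
        (fun y hy => by
          rcases List.mem_append.1 hy with hy | hy
          · simp [hx, h3 y hy]
          · simp [hx, h4 y hy])]
      rw [show (b0 ++ (b1 ++ b2)) ++ x :: (b3 ++ b4) = b0 ++ (b1 ++ ((b2 ++ [x]) ++ (b3 ++ b4))) by simp]
      exact ih b0 b1 (b2 ++ [x]) b3 b4 h0 h1
        (fun y hy => by
        rcases List.mem_append.1 hy with hy | hy
        · exact h2 y hy
        · rw [List.mem_singleton] at hy; rw [hy]; exact hx)
        h3 h4
    · rw [show b0 ++ (b1 ++ (b2 ++ (b3 ++ b4))) = (b0 ++ (b1 ++ (b2 ++ b3))) ++ b4 by simp]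
      rw [pvInsertBy_bucket _ x (b0 ++ (b1 ++ (b2 ++ b3))) b4
        (fun y hy => by
          simp only [List.mem_append] at hy
          rcases hy with hy | hy | hy | hy
          · simp [hx, h0 y hy]
          · simp [hx, h1 y hy]
          · simp [hx, h2 y hy]
          · simp [hx, h3 y hy])
        (fun y hy => by simp [hx, h4 y hy])]
      rw [show (b0 ++ (b1 ++ (b2 ++ b3))) ++ x :: b4 = b0 ++ (b1 ++ (b2 ++ ((b3 ++ [x]) ++ b4))) by simp]
      exact ih b0 b1 b2 (b3 ++ [x]) b4 h0 h1 h2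
        (fun y hy => by
        rcases List.mem_append.1 hy with hy | hy
        · exact h3 y hy
        · rw [List.mem_singleton] at hy; rw [hy]; exact hx)
        h4
    · rw [show b0 ++ (b1 ++ (b2 ++ (b3 ++ b4))) = (b0 ++ (b1 ++ (b2 ++ (b3 ++ b4)))) ++ [] by simp]
      rw [pvInsertBy_bucket _ x (b0 ++ (b1 ++ (b2 ++ (b3 ++ b4)))) []
        (fun y hy => by
          simp only [List.mem_append] at hy
          rcases hy with hy | hy | hy | hy | hy
          · simp [hx, h0 y hy]
          · simp [hx, h1 y hy]
          · simp [hx, h2 y hy]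
          · simp [hx, h3 y hy]
          · simp [hx, h4 y hy])
        (fun y hy => by simp at hy)]
      rw [show (b0 ++ (b1 ++ (b2 ++ (b3 ++ b4)))) ++ x :: [] = b0 ++ (b1 ++ (b2 ++ (b3 ++ (b4 ++ [x])))) by simp]
      exact ih b0 b1 b2 b3 (b4 ++ [x]) h0 h1 h2 h3
        (fun y hy => by
        rcases List.mem_append.1 hy with hy | hy
        · exact h4 y hy
        · rw [List.mem_singleton] at hy; rw [hy]; exact hx)

-- ===== VERDICT (by name: the statement is the Claim_ definition above) =====
theorem prioritize_files_py_spec : Claim_equal_prioritize_files_py := by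
  intro file_paths _
  unfold Spec_prioritize_files_py prioritize_files_py prioritize_files_py_alt
  rw [PySem.List.sorted_eq_foldl_insertBy]
  simpa using pvLoop file_paths [] [] [] [] []
    (by simp) (by simp) (by simp) (by simp) (by simp)
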